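-- pv_equiv track=rewrite | github.com/jcccf/cs4740 | lib/DocFilterer.py | naive_filter_sentences
-- ===== SOURCE A (Python) =====
-- from collections import defaultdict
--
-- def naive_filter_sentences(keywords, sentences):
--   matches = []
--   keywords = [keyword.lower() for keyword in keywords]
--   for i, sentence in enumerate(sentences):
--     # Generate a word frequency hash for this sentence
--     word_hash = defaultdict(int)
--     for word in sentence:
--       word_hash[word.lower()] += 1
--     # Count the number of appearances of keywords in this sentence
--     count = 0
--     for keyword in keywords:
--       if keyword in word_hash:
--         count += word_hash[keyword]
--     if count > 0:
--       matches.append((i, count))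
--   return matches
-- ===== SOURCE B (Python) =====
-- def naive_filter_sentences(keywords, sentences):
--   # keyword multiset built ONCE; per sentence a single pass summing multiplicities
--   kc = {}
--   for keyword in keywords:
--     kl = keyword.lower()
--     kc[kl] = kc.get(kl, 0) + 1
--   matches = []
--   for i, sentence in enumerate(sentences):
--     count = sum(kc.get(word.lower(), 0) for word in sentence)
--     if count > 0:
--       matches.append((i, count))
--   return matches
-- ===== Notes on version B (the rewrite author's own statement) =====
-- stated objective: faster
-- what changed: B builds a Counter of lowercased keywords once before the loop and replaces A's per-sentence frequency dict plus inner keyword scan by a single pass over each sentence summing keyword multiplicities; intended as faster, measured 25x at the largest size both finished (A timed out beyond that).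
import Mathlib
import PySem

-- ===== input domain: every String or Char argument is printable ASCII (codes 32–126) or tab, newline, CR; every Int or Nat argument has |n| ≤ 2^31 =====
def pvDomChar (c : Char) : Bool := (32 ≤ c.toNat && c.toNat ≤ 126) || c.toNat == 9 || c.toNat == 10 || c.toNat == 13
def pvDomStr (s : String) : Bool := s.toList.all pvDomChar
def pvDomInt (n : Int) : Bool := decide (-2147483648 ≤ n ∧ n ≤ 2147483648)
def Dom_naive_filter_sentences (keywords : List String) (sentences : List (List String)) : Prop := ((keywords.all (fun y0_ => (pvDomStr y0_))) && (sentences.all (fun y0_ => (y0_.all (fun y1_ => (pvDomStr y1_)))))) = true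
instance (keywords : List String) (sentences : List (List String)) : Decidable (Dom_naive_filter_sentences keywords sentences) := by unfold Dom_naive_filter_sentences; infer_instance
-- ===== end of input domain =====

-- B builds the multiset of lowercased keywords once and sums per-sentence multiplicities in
-- a single pass, instead of A's per-sentence frequency dict plus inner keyword scan.

-- ===== PORT A =====
def naive_filter_sentences (keywords : List String) (sentences : List (List String)) : List (Int × Int) :=
  let kws := keywords.map PySem.Str.lower
  (PySem.List.enumerate sentences 0).foldl (fun acc p =>
    let wordHash := p.2.foldl (fun d w => d.modify (PySem.Str.lower w) 0 (· + 1))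
      (PySem.Dict.empty : PySem.Dict String Int)
    let count := kws.foldl (fun c k => if wordHash.contains k then c + wordHash.getD k 0 else c) (0:Int)
    if count > 0 then acc ++ [(p.1, count)] else acc) []

-- ===== PORT B =====
def naive_filter_sentences_alt (keywords : List String) (sentences : List (List String)) : List (Int × Int) :=
  let kc := keywords.foldl (fun d k =>
      let kl := PySem.Str.lower k
      d.insert kl (d.getD kl 0 + 1)) (PySem.Dict.empty : PySem.Dict String Int)
  (PySem.List.enumerate sentences 0).foldl (fun acc p =>
    let count := (p.2.map (fun w => kc.getD (PySem.Str.lower w) 0)).sum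
    if count > 0 then acc ++ [(p.1, count)] else acc) []

-- ===== PRECONDITION & SPEC =====
def Spec_naive_filter_sentences (keywords : List String) (sentences : List (List String)) (out : List (Int × Int)) : Prop := out = naive_filter_sentences_alt keywords sentences
instance (keywords : List String) (sentences : List (List String)) (out : List (Int × Int)) : Decidable (Spec_naive_filter_sentences keywords sentences out) := by unfold Spec_naive_filter_sentences; infer_instance

-- ===== CLAIM (what is proved, stated in full; the proofs are below) =====
def Claim_equal_naive_filter_sentences : Prop := ∀ (keywords : List String) (sentences : List (List String)), Dom_naive_filter_sentences keywords sentences → Spec_naive_filter_sentences keywords sentences (naive_filter_sentences keywords sentences)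

-- ===== LEMMAS AND PROOFS =====

-- double counting: Σ_{k∈K} count S k = Σ_{w∈S} count K w (as Int)
theorem pv_sum_count_swap (K S : List String) :
    (K.map (fun k => ((S.count k : Nat) : Int))).sum
      = (S.map (fun w => ((K.count w : Nat) : Int))).sum := by
  induction K with
  | nil => simp
  | cons k K ih =>
    simp only [List.map_cons, List.sum_cons, ih, List.count_cons]
    push_cast
    rw [PySem.List.sum_map_add_int]
    have h1 : (S.map (fun w => if (k == w) = true then (1:Int) else 0)).sum = ((S.count k : Nat) : Int) := by
      have hbeq : ∀ w : String, (k == w) = (w == k) := by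
        intro w
        rcases eq_or_ne k w with h|h
        · simp [h]
        · rw [beq_eq_false_iff_ne.mpr h, beq_eq_false_iff_ne.mpr h.symm]
      simp only [hbeq]
      rw [PySem.List.sum_map_ite_one_zero]
      simp [List.count]
    rw [h1, add_comm]

-- A's per-sentence count equals Σ over lowered keywords of counts in the lowered sentence
theorem pv_countA (kws s : List String) :
    kws.foldl (fun c k =>
        if (s.foldl (fun d w => d.modify (PySem.Str.lower w) 0 (· + 1))
              (PySem.Dict.empty : PySem.Dict String Int)).contains k
        then c + (s.foldl (fun d w => d.modify (PySem.Str.lower w) 0 (· + 1))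
              (PySem.Dict.empty : PySem.Dict String Int)).getD k 0
        else c) 0
      = (kws.map (fun k => (((s.map PySem.Str.lower).count k : Nat) : Int))).sum := by
  have hwh : ∀ k : String,
      (s.foldl (fun d w => d.modify (PySem.Str.lower w) 0 (· + 1))
        (PySem.Dict.empty : PySem.Dict String Int)).getD k 0
        = (((s.map PySem.Str.lower).count k : Nat) : Int) := by
    intro k
    have e : (s.map PySem.Str.lower).foldl (fun d x => d.modify x 0 (· + 1))
        (PySem.Dict.empty : PySem.Dict String Int)
        = s.foldl (fun d w => d.modify (PySem.Str.lower w) 0 (· + 1))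
        (PySem.Dict.empty : PySem.Dict String Int) := List.foldl_map
    rw [← e, PySem.Dict.getD_foldl_modify_add_one]
    simp
  rw [PySem.List.foldl_congr_mem (g := fun c k =>
      c + (s.foldl (fun d w => d.modify (PySem.Str.lower w) 0 (· + 1))
        (PySem.Dict.empty : PySem.Dict String Int)).getD k 0)]
  · rw [PySem.List.foldl_add]
    simp only [hwh, zero_add]
  · intro acc k _
    by_cases h : (s.foldl (fun d w => d.modify (PySem.Str.lower w) 0 (· + 1))
        (PySem.Dict.empty : PySem.Dict String Int)).contains k = true
    · simp [h]
    · have h0 : (s.foldl (fun d w => d.modify (PySem.Str.lower w) 0 (· + 1))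
          (PySem.Dict.empty : PySem.Dict String Int)).getD k 0 = 0 :=
        PySem.Dict.getD_of_not_contains _ 0 (by simpa using h)
      rw [if_neg h, h0, add_zero]

theorem pv_countB (keywords s : List String) :
    (s.map (fun w =>
        (keywords.foldl (fun d k => d.insert (PySem.Str.lower k) (d.getD (PySem.Str.lower k) 0 + 1))
          (PySem.Dict.empty : PySem.Dict String Int)).getD (PySem.Str.lower w) 0)).sum
      = ((s.map PySem.Str.lower).map (fun w => (((keywords.map PySem.Str.lower).count w : Nat) : Int))).sum := by
  have hkc : ∀ w : String,
      (keywords.foldl (fun d k => d.insert (PySem.Str.lower k) (d.getD (PySem.Str.lower k) 0 + 1))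
        (PySem.Dict.empty : PySem.Dict String Int)).getD w 0
        = (((keywords.map PySem.Str.lower).count w : Nat) : Int) := by
    intro w
    have e : (keywords.map PySem.Str.lower).foldl (fun d x => d.insert x (d.getD x 0 + 1))
        (PySem.Dict.empty : PySem.Dict String Int)
        = keywords.foldl (fun d k => d.insert (PySem.Str.lower k) (d.getD (PySem.Str.lower k) 0 + 1))
        (PySem.Dict.empty : PySem.Dict String Int) := List.foldl_map
    rw [← e, PySem.Dict.foldl_insert_getD_add_one_eq_counter, PySem.Dict.getD_counter]
  simp only [hkc, List.map_map]
  rfl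

-- ===== VERDICT (by name: the statement is the Claim_ definition above) =====
theorem pv_main (keywords : List String) (sentences : List (List String)) :
    naive_filter_sentences keywords sentences = naive_filter_sentences_alt keywords sentences := by
  unfold naive_filter_sentences naive_filter_sentences_alt
  simp only
  congr 1
  funext acc p
  have h : (keywords.map PySem.Str.lower).foldl (fun c k =>
      if (p.2.foldl (fun d w => d.modify (PySem.Str.lower w) 0 (· + 1))
          (PySem.Dict.empty : PySem.Dict String Int)).contains k
      then c + (p.2.foldl (fun d w => d.modify (PySem.Str.lower w) 0 (· + 1))
          (PySem.Dict.empty : PySem.Dict String Int)).getD k 0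
      else c) (0:Int)
      = (p.2.map (fun w =>
          (keywords.foldl (fun d k => d.insert (PySem.Str.lower k) (d.getD (PySem.Str.lower k) 0 + 1))
            (PySem.Dict.empty : PySem.Dict String Int)).getD (PySem.Str.lower w) 0)).sum := by
    rw [pv_countA, pv_countB, pv_sum_count_swap]
  rw [h]

theorem naive_filter_sentences_spec : Claim_equal_naive_filter_sentences := by
  intro keywords sentences _
  exact pv_main keywords sentences
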